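-- pv_equiv track=rewrite | github.com/matiasandov/codingFights | codingFIghts/facebookABCS2021/amazon/MinimumNumberofKeypresses.py | minimumKeypresses
-- ===== SOURCE A (Python) =====
-- import collections
--
-- def minimumKeypresses(s: str) -> int:
--     """
--     the most common chars should be at the beginning of the button
--     1. contar freq de cada uno en un dicc
--     2. ordenar el dicc
--
--     3.rellenar un hash de set para contar despues la posicion
--     3.1 rellenar del 1 al 9 siguiendo el orden en y add diccFreq[i]
--     3.2 si ya se llego al 9 reiniciar el contador a 1 y add
--
--     4. iterar palabra if palabra[i] in hashS[palabra[i]] -> obtener posicion + 1 para contar clicks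
--
--     """
--     #te ahorra espacio usar colection
--     freq = collections.Counter(s)
--
--     #invertir y sort values by frequency -> del mas frecuente al menos frecuente
--     freq = dict(sorted(freq.items(), key = lambda pair:pair[1], reverse = True))
--
--     #como 0/9 es = 0 se va aumentar en la primera iteracion!!!
--     posButton = 0
--     clicks = 0
--     #necesitas enumerate para el index es lo mas importante!!!!!!!!!!!!!!!!!!!!!!!!!!!!!!!!!!!!!!!!1
--     for indexEn, valFreq in enumerate(freq.values()):
--
--         if indexEn % 9 == 0:
--             posButton += 1
--
--         clicks += posButton * valFreq
--
--     return clicks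
-- ===== SOURCE B (Python) =====
-- import collections
--
-- def minimumKeypresses(s: str) -> int:
--     # No comparison sort: histogram the frequency values (counting sort) and
--     # scan possible frequencies from high to low, placing keys on the keypad.
--     freq = collections.Counter(s)
--     buckets = collections.Counter(freq.values())
--     total = 0
--     placed = 0
--     for f in range(len(s), 0, -1):
--         for _ in range(buckets[f]):
--             total += (placed // 9 + 1) * f
--             placed += 1
--     return total
-- ===== Notes on version B (the rewrite author's own statement) =====
-- stated objective: alternative
-- what changed: Replaces A's comparison sort of (char,count) pairs plus one enumerate pass with a modulo button counter by a counting-sort scheme: histogram the frequency values into a second Counter and scan candidate frequencies from len(s) down to 1, placing each bucket's keys with a placed//9 level formula; no sorting at all.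
import Mathlib
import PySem

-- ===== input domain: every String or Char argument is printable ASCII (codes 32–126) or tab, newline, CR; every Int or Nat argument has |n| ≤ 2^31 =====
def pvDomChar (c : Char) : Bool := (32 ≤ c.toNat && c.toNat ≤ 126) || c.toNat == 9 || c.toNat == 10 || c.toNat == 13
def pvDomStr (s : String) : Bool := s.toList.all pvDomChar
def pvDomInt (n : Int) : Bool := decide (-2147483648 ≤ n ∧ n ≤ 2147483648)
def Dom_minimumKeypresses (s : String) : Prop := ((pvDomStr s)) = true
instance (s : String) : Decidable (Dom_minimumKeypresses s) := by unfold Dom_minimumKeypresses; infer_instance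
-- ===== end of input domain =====

-- B replaces A's sort of (char,count) pairs + enumerate/modulo pass by a counting-sort scheme:
-- histogram the frequency values and scan candidate frequencies from len(s) down to 1 (alternative, no sort).

-- ===== PORT A =====
-- loop body of A's 'for indexEn, valFreq in enumerate(freq.values())'
def pvStepA (acc : Int × Int) (iv : Int × Int) : Int × Int :=
  let posButton := if iv.1 % 9 == 0 then acc.1 + 1 else acc.1
  (posButton, acc.2 + posButton * iv.2)

def minimumKeypresses (s : String) : Int :=
  let freq := PySem.Dict.counter s.toList
  let freq2 := PySem.Dict.mk (PySem.List.sorted freq.items (fun pair => pair.2) true)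
  let st := (PySem.List.enumerate freq2.values 0).foldl pvStepA (0, 0)
  st.2

-- ===== PORT B =====
-- inner loop body: 'total += (placed // 9 + 1) * f; placed += 1'  (state = (total, placed))
def pvStepB (st : Int × Int) (f : Int) : Int × Int :=
  (st.1 + (PySem.Int.floordiv st.2 9 + 1) * f, st.2 + 1)

def minimumKeypresses_alt (s : String) : Int :=
  let freq := PySem.Dict.counter s.toList
  let buckets := PySem.Dict.counter freq.values
  let st := (PySem.List.pyRange (PySem.Str.len s) 0 (-1)).foldl
    (fun st f => (PySem.List.pyRange 0 (buckets.getD f 0) 1).foldl (fun st _ => pvStepB st f) st)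
    (0, 0)
  st.1

-- ===== PRECONDITION & SPEC =====
def Spec_minimumKeypresses (s : String) (out : Int) : Prop := out = minimumKeypresses_alt s
instance (s : String) (out : Int) : Decidable (Spec_minimumKeypresses s out) := by unfold Spec_minimumKeypresses; infer_instance

-- ===== CLAIM (what is proved, stated in full; the proofs are below) =====
def Claim_equal_minimumKeypresses : Prop := ∀ (s : String), Dom_minimumKeypresses s → Spec_minimumKeypresses s (minimumKeypresses s)

-- ===== LEMMAS AND PROOFS =====

-- closed form: element at index n (0-based) costs (n/9 + 1) presses
def pvS : List Int → Nat → Int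
  | [], _ => 0
  | v :: r, n => (((n / 9 : Nat) : Int) + 1) * v + pvS r (n + 1)

theorem pvLemA (vs : List Int) : ∀ (n : Nat) (c : Int),
    ((PySem.List.enumerate vs (n : Int)).foldl pvStepA ((((n + 8) / 9 : Nat) : Int), c)).2
      = c + pvS vs n := by
  induction vs with
  | nil => intro n c; simp [PySem.List.enumerate_nil, pvS]
  | cons v r ih =>
    intro n c
    rw [PySem.List.enumerate_cons]
    have hcond : (((n : Int) % 9 == 0)) = (decide (n % 9 = 0)) := by
      rcases Nat.eq_zero_or_pos (n % 9) with h | h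
      · simp [show ((n : Int) % 9 = 0) from by omega, h]
      · simp [show ¬((n : Int) % 9 = 0) from by omega, show ¬(n % 9 = 0) from by omega]
    have hpos : (if ((n : Int) % 9 == 0) then (((n + 8) / 9 : Nat) : Int) + 1
        else (((n + 8) / 9 : Nat) : Int)) = (((n / 9 : Nat) : Int) + 1) := by
      rw [hcond]
      by_cases h : n % 9 = 0
      · simp [h]; omega
      · simp [h]; omega
    have hnext : (((n / 9 : Nat) : Int) + 1) = (((n + 1 + 8) / 9 : Nat) : Int) := by omega
    simp only [List.foldl_cons, pvStepA, hpos]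
    have hc1 : ((n : Int) + 1) = (((n + 1 : Nat)) : Int) := by push_cast; ring
    rw [hnext, hc1, ih (n + 1) (c + (((n + 1 + 8) / 9 : Nat) : Int) * v)]
    simp only [pvS]
    rw [← hnext]
    ring

-- mapping the sort key out of a stable sort-by-key
theorem pvSortedSnd (ps : List ((Char × Int))) :
    (PySem.List.sorted ps (fun pair => pair.2) true).map (fun pair => pair.2)
      = PySem.List.sorted (ps.map (fun pair => pair.2)) (fun v => v) true := by
  apply List.Perm.eq_of_pairwise (le := fun a b : Int => b ≤ a)
  · intro a b _ _ h1 h2; omega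
  · rw [List.pairwise_map]
    exact PySem.List.sorted_pairwise_rev ps (fun pair => pair.2)
  · exact PySem.List.sorted_pairwise_rev (ps.map (fun pair => pair.2)) (fun v => v)
  · exact ((PySem.List.sorted_perm ps (fun pair => pair.2) true).map _).trans
      (PySem.List.sorted_perm (ps.map (fun pair => pair.2)) (fun v => v) true).symm

-- B's fold over any emitted list computes pvS
theorem pvFoldB (xs : List Int) : ∀ (n : Nat) (t : Int),
    xs.foldl pvStepB (t, (n : Int)) = (t + pvS xs n, ((n + xs.length : Nat) : Int)) := by
  induction xs with
  | nil => intro n t; simp [pvS]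
  | cons v r ih =>
    intro n t
    have hdiv : PySem.Int.floordiv (n : Int) 9 = (((n / 9 : Nat)) : Int) := by
      simp [PySem.Int.floordiv, Int.fdiv_eq_ediv]
    have h1 : ((n : Int) + 1) = (((n + 1 : Nat)) : Int) := by push_cast; ring
    simp only [List.foldl_cons, pvStepB, hdiv, h1, ih (n + 1)]
    rw [Prod.mk.injEq]
    refine ⟨by simp only [pvS]; ring, by simp only [List.length_cons]; omega⟩

-- the inner fold emits (c.toNat) copies of f
theorem pvInner (c : Int) (f : Int) (st : Int × Int) :
    (PySem.List.pyRange 0 c 1).foldl (fun st _ => pvStepB st f) st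
      = (List.replicate c.toNat f).foldl pvStepB st := by
  have hlen : (PySem.List.pyRange 0 c 1).length = c.toNat := by
    rw [PySem.List.length_pyRange_one]; omega
  rw [← hlen]
  generalize PySem.List.pyRange 0 c 1 = l
  induction l generalizing st with
  | nil => rfl
  | cons a r ih => simp only [List.foldl_cons, List.length_cons, List.replicate_succ]; exact ih _

-- nested fold = fold over the flatMap of replicate blocks
theorem pvNest (l : List Int) (c : Int → Int) (st : Int × Int) :
    l.foldl (fun st f => (PySem.List.pyRange 0 (c f) 1).foldl (fun st _ => pvStepB st f) st) st
      = (l.flatMap (fun f => List.replicate (c f).toNat f)).foldl pvStepB st := by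
  induction l generalizing st with
  | nil => rfl
  | cons a r ih =>
    simp only [List.foldl_cons, List.flatMap_cons, List.foldl_append]
    rw [pvInner]
    exact ih _

theorem pvCountFlat (l : List Int) (hl : l.Nodup) (c : Int → Nat) (m : Int) :
    (l.flatMap (fun f => List.replicate (c f) f)).count m = if m ∈ l then c m else 0 := by
  induction l with
  | nil => simp
  | cons a r ih =>
    simp only [List.flatMap_cons, List.count_append, List.count_replicate,
      List.nodup_cons] at *
    rw [ih hl.2]
    by_cases h : m = a
    · subst h; simp [hl.1]
    · simp [h, Ne.symm h]

theorem pvPairFlat (l : List Int) (c : Int → Nat) (hl : l.Pairwise (fun a b => b < a)) :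
    (l.flatMap (fun f => List.replicate (c f) f)).Pairwise (fun a b : Int => b ≤ a) := by
  induction l with
  | nil => simp
  | cons a r ih =>
    simp only [List.flatMap_cons, List.pairwise_append, List.pairwise_cons] at *
    refine ⟨?_, ih hl.2, ?_⟩
    · exact List.pairwise_replicate.mpr (Or.inr (le_refl a))
    intro x hx y hy
    rw [List.eq_of_mem_replicate hx]
    obtain ⟨f, hf, hyf⟩ := List.mem_flatMap.mp hy
    rw [List.eq_of_mem_replicate hyf]
    exact le_of_lt (hl.1 f hf)

-- the countdown range is strictly decreasing
theorem pvRangeDesc (a b : Int) : (PySem.List.pyRange a b (-1)).Pairwise (fun x y => y < x) := by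
  rw [PySem.List.pyRange_neg_one_eq_reverse, List.pairwise_reverse]
  exact PySem.List.pairwise_lt_pyRange_one _ _

-- every frequency value of Counter(s) lies in [1, len(s)]
theorem pvValBound (cs : List Char) (v : Int) (hv : v ∈ (PySem.Dict.counter cs).values) :
    1 ≤ v ∧ v ≤ (cs.length : Int) := by
  have : (PySem.Dict.counter cs).values
      = ((PySem.Dict.counter cs).items).map (fun p => p.2) := rfl
  rw [this, PySem.Dict.items_counter] at hv
  simp only [List.map_map, List.mem_map, Function.comp] at hv
  obtain ⟨k, hk, hkv⟩ := hv
  have hkmem : k ∈ cs := (PySem.Set.mem_ofList _ _).mp hk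
  have h1 : 1 ≤ cs.count k := List.one_le_count_iff.mpr hkmem
  have h2 : cs.count k ≤ cs.length := List.count_le_length
  constructor <;> omega

-- B's emitted multiset IS the value multiset, in non-increasing order
theorem pvEmitEq (cs : List Char) :
    ((PySem.List.pyRange (cs.length : Int) 0 (-1)).flatMap
        (fun f => List.replicate ((PySem.Dict.counter (PySem.Dict.counter cs).values).getD f 0).toNat f))
      = PySem.List.sorted (PySem.Dict.counter cs).values (fun v => v) true := by
  set vals := (PySem.Dict.counter cs).values with hvals
  have hcount : ∀ f : Int,
      ((PySem.Dict.counter vals).getD f 0).toNat = vals.count f := by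
    intro f
    rw [PySem.Dict.getD_counter]
    omega
  have hnodup : (PySem.List.pyRange (cs.length : Int) 0 (-1)).Nodup :=
    (pvRangeDesc _ _).imp (fun h => ne_of_gt h)
  have hperm : ((PySem.List.pyRange (cs.length : Int) 0 (-1)).flatMap
      (fun f => List.replicate ((PySem.Dict.counter vals).getD f 0).toNat f)).Perm vals := by
    rw [List.perm_iff_count]
    intro m
    rw [pvCountFlat _ hnodup _ m, hcount m]
    by_cases hm : m ∈ PySem.List.pyRange (cs.length : Int) 0 (-1)
    · simp [hm]
    · simp only [hm, if_false]
      by_cases hmv : m ∈ vals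
      · exfalso
        have := pvValBound cs m hmv
        exact hm ((PySem.List.mem_pyRange_neg_one).mpr ⟨by omega, by omega⟩)
      · simp [List.count_eq_zero_of_not_mem hmv]
  apply List.Perm.eq_of_pairwise (le := fun a b : Int => b ≤ a)
  · intro a b _ _ h1 h2; omega
  · exact pvPairFlat _ _ (pvRangeDesc _ _)
  · exact PySem.List.sorted_pairwise_rev vals (fun v => v)
  · exact hperm.trans (PySem.List.sorted_perm vals (fun v => v) true).symm

-- ===== VERDICT (by name: the statement is the Claim_ definition above) =====
theorem minimumKeypresses_spec : Claim_equal_minimumKeypresses := by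
  intro s _
  unfold Spec_minimumKeypresses minimumKeypresses minimumKeypresses_alt
  have hv : (PySem.Dict.mk (PySem.List.sorted (PySem.Dict.counter s.toList).items
      (fun pair => pair.2) true)).values
      = PySem.List.sorted (PySem.Dict.counter s.toList).values (fun v => v) true := by
    rw [PySem.Dict.values_mk, pvSortedSnd]
    rfl
  simp only [hv]
  set vals := PySem.List.sorted (PySem.Dict.counter s.toList).values (fun v => v) true with hvals
  have hA := pvLemA vals 0 0
  norm_num at hA
  rw [hA]
  have hlen : PySem.Str.len s = (s.toList.length : Int) := by
    simp [PySem.Str.len]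
  rw [hlen, pvNest]
  rw [pvEmitEq s.toList]
  have hB := pvFoldB vals 0 0
  norm_num at hB
  rw [hB]
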